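-- pv_equiv track=rewrite | github.com/astha99/EyeLLM | src/main/dataWrangling.py | get_completion
-- ===== SOURCE A (Python) =====
-- def get_completion(pretext0, pretextn):
--     """ Extract the continuation portion of pretextn that is not in pretext0. """
--     pretextn = pretextn.lstrip()  # Ignore leading spaces in pretextn
--     if pretextn.startswith(pretext0):
--         return pretextn[len(pretext0):].strip()  # Remove the already present part
--     else:
--         # If pretext0 is not exactly at the start, find the largest overlap
--         for i in range(len(pretext0)):
--             if pretextn.startswith(pretext0[i:]):
--                 return pretextn[len(pretext0[i:]):].strip()
--         return pretextn.strip()  # Ensure no leading/trailing spaces in the result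
-- ===== SOURCE B (Python) =====
-- def get_completion(pretext0, pretextn):
--     """Extract the continuation portion of pretextn that is not in pretext0.
--
--     One left-to-right pass over pretext0, maintaining the set of lengths j such
--     that t[:j] is a suffix of the part of pretext0 scanned so far (the live
--     states of the nondeterministic prefix-matching automaton for t); the largest
--     surviving length at the end is the overlap to strip.
--     """
--     t = pretextn.lstrip()
--     live = [0]
--     for c in pretext0:
--         live = [j + 1 for j in live if j < len(t) and t[j] == c]
--         live.append(0)
--     return t[max(live):].strip()
-- ===== Notes on version B (the rewrite author's own statement) =====
-- stated objective: faster
-- what changed: A tries each overlap candidate separately, slicing pretext0 at every start position and calling startswith until one matches (O(n^2) slice comparisons); B makes a single left-to-right pass over pretext0 maintaining the set of live prefix-match lengths of the stripped pretextn (NFA-style simultaneous matching) and strips at the largest surviving length, so on typical text the frontier stays small and the per-candidate slicing loop disappears.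
import Mathlib
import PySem

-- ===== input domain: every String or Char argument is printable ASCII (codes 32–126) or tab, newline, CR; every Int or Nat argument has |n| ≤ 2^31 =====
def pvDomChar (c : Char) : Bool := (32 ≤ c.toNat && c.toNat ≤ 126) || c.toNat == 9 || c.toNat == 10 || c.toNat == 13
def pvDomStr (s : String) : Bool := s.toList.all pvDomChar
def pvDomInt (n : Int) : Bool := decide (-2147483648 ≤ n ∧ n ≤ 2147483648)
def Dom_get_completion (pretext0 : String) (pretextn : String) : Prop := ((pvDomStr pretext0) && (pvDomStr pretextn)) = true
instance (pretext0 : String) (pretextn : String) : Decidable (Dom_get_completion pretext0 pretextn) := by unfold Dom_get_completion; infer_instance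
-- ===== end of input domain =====

-- B replaces A's cascade of slice-and-startswith overlap tests by a single left-to-right pass
-- over pretext0 that maintains the set of live prefix-match lengths of t (NFA simulation);
-- same value, a genuinely different traversal.

-- ===== PORT A =====
-- for i in range(len(pretext0)): if pretextn.startswith(pretext0[i:]): return …  (early return)
def getCompLoopA (pretext0 pretextn : String) : List Int → String
  | [] => PySem.Str.strip pretextn
  | i :: rest =>
    if PySem.Str.startswith pretextn (PySem.Str.slice pretext0 (some i) none) then
      PySem.Str.strip (PySem.Str.slice pretextn
        (some (PySem.Str.len (PySem.Str.slice pretext0 (some i) none))) none)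
    else
      getCompLoopA pretext0 pretextn rest

def get_completion (pretext0 : String) (pretextn : String) : String :=
  let t := PySem.Str.lstrip pretextn
  if PySem.Str.startswith t pretext0 then
    PySem.Str.strip (PySem.Str.slice t (some (PySem.Str.len pretext0)) none)
  else
    getCompLoopA pretext0 t (PySem.List.pyRange 0 (PySem.Str.len pretext0) 1)

-- ===== PORT B =====
-- live = [j + 1 for j in live if j < len(t) and t[j] == c]; live.append(0)
def stepLive (t : List Char) (live : List Nat) (c : Char) : List Nat :=
  (live.filterMap (fun j =>
    if hj : j < t.length then (if t[j]'hj == c then some (j + 1) else none) else none)) ++ [0]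

def get_completion_alt (pretext0 : String) (pretextn : String) : String :=
  let t := PySem.Str.lstrip pretextn
  let live := pretext0.toList.foldl (stepLive t.toList) [0]
  -- max(live): live always contains 0, so max? is some and .getD 0 is exact
  let m := (PySem.List.max? live (fun j => j)).getD 0
  PySem.Str.strip (PySem.Str.slice t (some ((m : Nat) : Int)) none)

-- ===== PRECONDITION & SPEC =====
def Spec_get_completion (pretext0 : String) (pretextn : String) (out : String) : Prop := out = get_completion_alt pretext0 pretextn
instance (pretext0 : String) (pretextn : String) (out : String) : Decidable (Spec_get_completion pretext0 pretextn out) := by unfold Spec_get_completion; infer_instance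

-- ===== CLAIM (what is proved, stated in full; the proofs are below) =====
def Claim_equal_get_completion : Prop := ∀ (pretext0 : String) (pretextn : String), Dom_get_completion pretext0 pretextn → Spec_get_completion pretext0 pretextn (get_completion pretext0 pretextn)

-- ===== LEMMAS AND PROOFS =====

-- pvF p s: the least i with p.drop i a prefix of s (i = p.length always works).
def pvF (p s : List Char) : Nat :=
  Nat.find (p := fun i => p.drop i <+: s) ⟨p.length, by simp⟩

lemma pvF_spec (p s : List Char) : p.drop (pvF p s) <+: s :=
  Nat.find_spec (p := fun i => p.drop i <+: s) ⟨p.length, by simp⟩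

lemma pvF_le (p s : List Char) {j : Nat} (h : p.drop j <+: s) : pvF p s ≤ j :=
  Nat.find_min' (p := fun i => p.drop i <+: s) ⟨p.length, by simp⟩ h

-- A's loop condition, moved to the list level
lemma aCond_iff (p0 t : String) (i : Nat) :
    (PySem.Str.startswith t (PySem.Str.slice p0 (some (i : Int)) none) = true)
      ↔ p0.toList.drop i <+: t.toList := by
  rw [PySem.Str.startswith_eq, PySem.Str.toList_slice, PySem.Chars.slice_eq_listSlice,
    PySem.List.slice_from_natCast, PySem.Chars.startswith_iff]

-- a length-j suffix-of-p = prefix-of-s correspondence (order of traversal does not matter)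
lemma pvTake_suffix_iff (p s : List Char) (j : Nat) (hjp : j ≤ p.length) (hjs : j ≤ s.length) :
    (s.take j <:+ p) ↔ (p.drop (p.length - j) <+: s) := by
  rw [List.suffix_iff_eq_drop, List.prefix_iff_eq_take, List.length_take, min_eq_left hjs,
    List.length_drop, show p.length - (p.length - j) = j by omega]
  exact ⟨fun h => h.symm, fun h => h.symm⟩

-- what A's early-return loop returns at position i, at the list level
lemma aRet_toList (p0 t : String) (i : Nat) :
    (PySem.Str.strip (PySem.Str.slice t
        (some (PySem.Str.len (PySem.Str.slice p0 (some (i : Int)) none))) none)).toList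
      = PySem.Chars.strip (t.toList.drop (p0.toList.length - i)) := by
  simp only [PySem.Str.toList_strip, PySem.Str.len_eq, PySem.Str.toList_slice,
    PySem.Chars.slice_eq_listSlice, PySem.List.slice_from_natCast, List.length_drop]

-- A's loop from index i computes the strip of t dropped at the least matching position
lemma aLoop_eq (p0 t : String) : ∀ (d i : Nat), i + d = p0.toList.length →
    (∀ j, j < i → ¬ (p0.toList.drop j <+: t.toList)) →
    (getCompLoopA p0 t (PySem.List.pyRange (i : Int) ((p0.toList.length : Nat) : Int) 1)).toList
      = PySem.Chars.strip (t.toList.drop (p0.toList.length - pvF p0.toList t.toList)) := by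
  intro d
  induction d with
  | zero =>
    intro i hi hmin
    have hin : i = p0.toList.length := by omega
    have hF : pvF p0.toList t.toList = p0.toList.length := by
      have h1 : pvF p0.toList t.toList ≤ p0.toList.length :=
        pvF_le _ _ (by rw [List.drop_length]; exact List.nil_prefix)
      by_contra hne
      exact hmin _ (by omega) (pvF_spec p0.toList t.toList)
    rw [PySem.List.pyRange_one_eq_nil (by exact_mod_cast Nat.le_of_eq hin.symm)]
    simp [getCompLoopA, PySem.Str.toList_strip, hF]
  | succ d ih =>
    intro i hi hmin
    have hlt : i < p0.toList.length := by omega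
    rw [PySem.List.pyRange_one_cons (by exact_mod_cast hlt)]
    simp only [getCompLoopA]
    by_cases hP : p0.toList.drop i <+: t.toList
    · rw [if_pos ((aCond_iff p0 t i).mpr hP)]
      have hFi : pvF p0.toList t.toList = i := by
        have h1 := pvF_le _ _ hP
        by_contra hne
        exact hmin _ (by omega) (pvF_spec p0.toList t.toList)
      rw [aRet_toList, hFi]
    · rw [if_neg (fun h => hP ((aCond_iff p0 t i).mp h))]
      rw [show ((i : Int) + 1) = ((i + 1 : Nat) : Int) by push_cast; ring]
      exact ih (i + 1) (by omega) (fun j hj => by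
        rcases Nat.lt_succ_iff_lt_or_eq.mp hj with h' | h'
        · exact hmin j h'
        · exact h' ▸ hP)

-- (l ++ [a]) is a suffix of (x ++ [c]) iff the last characters agree and l is a suffix of x
lemma pvConcat_suffix_concat (l x : List Char) (a c : Char) :
    (l ++ [a]) <:+ (x ++ [c]) ↔ a = c ∧ l <:+ x := by
  rw [← List.reverse_prefix, List.reverse_append, List.reverse_append]
  simp only [List.reverse_singleton, List.singleton_append, List.cons_prefix_cons,
    List.reverse_prefix]

-- the frontier invariant: live holds exactly the lengths j with t.take j a suffix of the scanned part
lemma stepLive_inv (t x : List Char) (live : List Nat) (c : Char)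
    (h : ∀ j, j ∈ live ↔ (j ≤ t.length ∧ t.take j <:+ x)) :
    ∀ j, j ∈ stepLive t live c ↔ (j ≤ t.length ∧ t.take j <:+ (x ++ [c])) := by
  intro j
  unfold stepLive
  rw [List.mem_append, List.mem_filterMap]
  constructor
  · rintro (⟨j', hj', hf⟩ | h0)
    · by_cases hjl : j' < t.length
      · rw [dif_pos hjl] at hf
        by_cases hc : t[j']'hjl == c
        · rw [if_pos hc] at hf
          obtain rfl : j' + 1 = j := by injection hf
          have hx := (h j').mp hj'
          refine ⟨by omega, ?_⟩
          have htake : t.take (j' + 1) = t.take j' ++ [t[j']'hjl] := by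
            rw [List.take_add_one, List.getElem?_eq_getElem hjl]; rfl
          rw [htake, pvConcat_suffix_concat]
          exact ⟨eq_of_beq hc, hx.2⟩
        · rw [if_neg hc] at hf; exact absurd hf (by simp)
      · rw [dif_neg hjl] at hf; exact absurd hf (by simp)
    · have hj0 : j = 0 := by simpa using h0
      subst hj0
      exact ⟨Nat.zero_le _, by simp [List.nil_suffix]⟩
  · rintro ⟨hjl, hsuf⟩
    cases j with
    | zero => right; simp
    | succ j' =>
      left
      have hj'l : j' < t.length := by omega
      have htake : t.take (j' + 1) = t.take j' ++ [t[j']'hj'l] := by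
        rw [List.take_add_one, List.getElem?_eq_getElem hj'l]; rfl
      rw [htake, pvConcat_suffix_concat] at hsuf
      refine ⟨j', (h j').mpr ⟨by omega, hsuf.2⟩, ?_⟩
      rw [dif_pos hj'l, if_pos (beq_iff_eq.mpr hsuf.1)]

-- propagate the invariant through the whole fold over p
lemma foldl_stepLive_inv (t : List Char) : ∀ (p x : List Char) (live : List Nat),
    (∀ j, j ∈ live ↔ (j ≤ t.length ∧ t.take j <:+ x)) →
    ∀ j, j ∈ p.foldl (stepLive t) live ↔ (j ≤ t.length ∧ t.take j <:+ (x ++ p)) := by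
  intro p
  induction p with
  | nil => intro x live h j; simpa using h j
  | cons c p ih =>
    intro x live h j
    rw [List.foldl_cons]
    have := ih (x ++ [c]) (stepLive t live c) (stepLive_inv t x live c h) j
    simpa using this

-- the initial frontier [0] satisfies the invariant for the empty scanned part
lemma init_inv (t : List Char) :
    ∀ j, j ∈ ([0] : List Nat) ↔ (j ≤ t.length ∧ t.take j <:+ ([] : List Char)) := by
  intro j
  simp only [List.mem_singleton, List.suffix_nil, List.take_eq_nil_iff]
  constructor
  · rintro rfl; simp
  · rintro ⟨hj, (rfl | rfl)⟩
    · rfl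
    · simp only [List.length_nil] at hj; omega

-- the maximum of the final frontier is p.length - pvF
lemma max_live_eq (p0 t : String) :
    (PySem.List.max? (p0.toList.foldl (stepLive (PySem.Str.lstrip t).toList) [0])
      (fun j => j)).getD 0
      = p0.toList.length - pvF p0.toList (PySem.Str.lstrip t).toList := by
  set tl := (PySem.Str.lstrip t).toList with htl
  set live := p0.toList.foldl (stepLive tl) [0] with hlive
  have hinv : ∀ j, j ∈ live ↔ (j ≤ tl.length ∧ tl.take j <:+ p0.toList) := by
    intro j
    have := foldl_stepLive_inv tl p0.toList [] [0] (init_inv tl) j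
    simpa using this
  set K := p0.toList.length - pvF p0.toList tl with hK
  have hPF := pvF_spec p0.toList tl
  have hFn : pvF p0.toList tl ≤ p0.toList.length :=
    pvF_le _ _ (by rw [List.drop_length]; exact List.nil_prefix)
  have hKt : K ≤ tl.length := by
    have := hPF.length_le
    rw [List.length_drop] at this
    omega
  have hKmem : K ∈ live := by
    rw [hinv]
    refine ⟨hKt, (pvTake_suffix_iff _ _ _ (by omega) hKt).mpr ?_⟩
    rw [show p0.toList.length - K = pvF p0.toList tl by omega]
    exact hPF
  have hub : ∀ j ∈ live, j ≤ K := by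
    intro j hj
    obtain ⟨hjt, hsuf⟩ := (hinv j).mp hj
    have hjp : j ≤ p0.toList.length := by
      have := hsuf.length_le
      rw [List.length_take, min_eq_left hjt] at this
      exact this
    have := pvF_le p0.toList tl ((pvTake_suffix_iff _ _ _ hjp hjt).mp hsuf)
    omega
  obtain ⟨m, hm⟩ : ∃ m, PySem.List.max? live (fun j => j) = some m := by
    cases hmx : PySem.List.max? live (fun j => j) with
    | none =>
      rw [PySem.List.max?_eq_none_iff] at hmx
      rw [hmx] at hKmem
      exact absurd hKmem (List.not_mem_nil)
    | some m => exact ⟨m, rfl⟩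
  rw [hm]
  have h1 : m ≤ K := hub m (PySem.List.max?_mem hm)
  have h2 : K ≤ m := PySem.List.max?_isMax hm K hKmem
  simp only [Option.getD_some]
  omega

lemma get_completion_eq (pretext0 pretextn : String) :
    get_completion pretext0 pretextn = get_completion_alt pretext0 pretextn := by
  apply String.toList_inj.mp
  have hB : (get_completion_alt pretext0 pretextn).toList
      = PySem.Chars.strip ((PySem.Str.lstrip pretextn).toList.drop
          (pretext0.toList.length - pvF pretext0.toList (PySem.Str.lstrip pretextn).toList)) := by
    simp only [get_completion_alt, PySem.Str.toList_strip, PySem.Str.toList_slice,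
      PySem.Chars.slice_eq_listSlice, PySem.List.slice_from_natCast,
      max_live_eq pretext0 pretextn]
  rw [hB]
  simp only [get_completion]
  by_cases h0 : pretext0.toList <+: (PySem.Str.lstrip pretextn).toList
  · have hc : PySem.Str.startswith (PySem.Str.lstrip pretextn) pretext0 = true := by
      rw [PySem.Str.startswith_eq, PySem.Chars.startswith_iff]; exact h0
    rw [if_pos hc]
    have hF0 : pvF pretext0.toList (PySem.Str.lstrip pretextn).toList = 0 :=
      Nat.le_zero.mp (pvF_le _ _ (by simpa using h0))
    simp only [PySem.Str.toList_strip, PySem.Str.len_eq, PySem.Str.toList_slice,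
      PySem.Chars.slice_eq_listSlice, PySem.List.slice_from_natCast, hF0, Nat.sub_zero]
  · have hc : ¬ (PySem.Str.startswith (PySem.Str.lstrip pretextn) pretext0 = true) := by
      rw [PySem.Str.startswith_eq, PySem.Chars.startswith_iff]; exact h0
    rw [if_neg hc]
    rw [PySem.Str.len_eq, show (0 : Int) = ((0 : Nat) : Int) by norm_num]
    exact aLoop_eq pretext0 (PySem.Str.lstrip pretextn) pretext0.toList.length 0 (by omega)
      (fun j hj => absurd hj (Nat.not_lt_zero j))

-- ===== VERDICT (by name: the statement is the Claim_ definition above) =====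
theorem get_completion_spec : Claim_equal_get_completion := by
  intro pretext0 pretextn _
  unfold Spec_get_completion
  exact get_completion_eq pretext0 pretextn
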